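-- pv_equiv track=rewrite | github.com/Christian-Boehme/RWTH_Aachen_HiWi | OxyflameBook/OxyflameBook_FileTransfer/B3/ROPA/Single/MechanismAdjustment/Scripts/GenerateMechanismDependentFunctions.py | extract_species
-- ===== SOURCE A (Python) =====
-- def find_species(line):
--     return line[line.find('S') + 1: line.find(')')]
--
-- def extract_species(r_num, reaction, line):
--
--     number_of_species = line.count("C(S")
--     line = line[line.index("S"):]
--
--     spec = find_species(line)
--     reaction = reaction + spec
--     line = line[line.index(")"):]
--
--     for i in range(1, number_of_species):
--         line = line[line.index("S"):]
--         add_spec = find_species(line)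
--         reaction += "+" + add_spec
--         line = line[2:]
--     if "M" in line:
--         # third-body
--         reaction += "(+M)"
--     if r_num[-1] == "F":
--         reaction += "="
--
--     return reaction
-- ===== SOURCE B (Python) =====
-- # Single index-based scan over the fixed string: each species fragment is located
-- # with index() start offsets and collected into a list that is joined once with '+'.
-- def extract_species(r_num, reaction, line):
--     number_of_species = line.count("C(S")
--     s = line.index("S")
--     p = line.index(")", s)
--     parts = [line[s + 1:p]]
--     pos = p
--     for _ in range(1, number_of_species):
--         s = line.index("S", pos)
--         p = line.index(")", s)
--         parts.append(line[s + 1:p])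
--         pos = s + 2
--     out = reaction + "+".join(parts)
--     if "M" in line[pos:]:
--         out += "(+M)"
--     if r_num.endswith("F"):
--         out += "="
--     return out
-- ===== Notes on version B (the rewrite author's own statement) =====
-- stated objective: alternative
-- what changed: B replaces A's repeated destructive slicing of `line` and incremental string concatenation with a single index-based scan over the original string (index() with start offsets) collecting the fragments into a list joined once with '+'; Pre_ excludes inputs where some species after the first lacks a closing ')', on which A silently returns a fragment truncated by the -1 from find(')') while B's index() raises ValueError.
-- outside the precondition, e.g. on extract_species('1', 'R: ', 'C(S A) C(S B'): A returns 'R:  A+ ', B raises ValueError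
import Mathlib
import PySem

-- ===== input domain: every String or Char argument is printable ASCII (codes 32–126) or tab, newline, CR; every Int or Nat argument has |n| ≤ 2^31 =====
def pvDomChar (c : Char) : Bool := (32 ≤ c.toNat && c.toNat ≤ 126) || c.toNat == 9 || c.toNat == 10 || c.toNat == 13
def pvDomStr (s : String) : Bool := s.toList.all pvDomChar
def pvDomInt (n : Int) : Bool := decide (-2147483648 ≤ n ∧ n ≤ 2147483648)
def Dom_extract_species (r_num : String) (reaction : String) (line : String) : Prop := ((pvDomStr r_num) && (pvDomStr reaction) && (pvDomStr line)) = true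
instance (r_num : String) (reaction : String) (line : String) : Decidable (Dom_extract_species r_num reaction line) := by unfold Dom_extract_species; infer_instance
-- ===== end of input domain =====

-- B replaces A's repeated destructive slicing of `line` and incremental string
-- concatenation by a single index-based scan of the original string that collects
-- the species fragments into a list joined once (objective: alternative).
-- Ports work on `String.toList`; `none` marks exactly the inputs where the Python raises.

-- ===== PORT A =====
-- helper find_species: line[line.find('S') + 1 : line.find(')')]
def find_speciesA (line : List Char) : List Char :=
  PySem.List.slice line (some (PySem.Chars.find line ['S'] + 1)) (some (PySem.Chars.find line [')']))

-- the for-loop `for i in range(1, number_of_species)`; none = ValueError from line.index("S")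
def loopA : Nat → List Char → List Char → Option (List Char × List Char)
  | 0, line, reaction => some (line, reaction)
  | n+1, line, reaction =>
      let s := PySem.Chars.find line ['S']
      if s = -1 then none
      else
        let line := PySem.List.slice line (some s) none
        let add_spec := find_speciesA line
        loopA n (PySem.List.slice line (some 2) none) (reaction ++ ['+'] ++ add_spec)

def extract_speciesCore (r_num reaction line : List Char) : Option (List Char) :=
  let number_of_species := PySem.Chars.count line "C(S".toList
  let s0 := PySem.Chars.find line ['S']
  if s0 = -1 then none else          -- line.index("S") raises ValueError
  let line1 := PySem.List.slice line (some s0) none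
  let spec := find_speciesA line1
  let reaction1 := reaction ++ spec
  let j := PySem.Chars.find line1 [')']
  if j = -1 then none else           -- line.index(")") raises ValueError
  let line2 := PySem.List.slice line1 (some j) none
  match loopA (number_of_species - 1) line2 reaction1 with
  | none => none
  | some (lineF, reactionF) =>
    let reaction2 := if PySem.Chars.isIn ['M'] lineF then reactionF ++ "(+M)".toList else reactionF
    match PySem.List.pyGet? r_num (-1 : Int) with
    | none => none                   -- r_num[-1] raises IndexError on ""
    | some c => some (if c = 'F' then reaction2 ++ ['='] else reaction2)

def extract_species (r_num : String) (reaction : String) (line : String) : String :=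
  String.ofList ((extract_speciesCore r_num.toList reaction.toList line.toList).getD [])

-- ===== PORT B =====
-- the for-loop of Source B: scans by index `pos` over the fixed string, collecting fragments;
-- none = ValueError from line.index("S", pos) / line.index(")", s)
def loopB : Nat → List Char → Int → List (List Char) → Option (Int × List (List Char))
  | 0, _, pos, parts => some (pos, parts)
  | n+1, line, pos, parts =>
      let s := PySem.Chars.findFrom line ['S'] pos none
      if s = -1 then none
      else
        let q := PySem.Chars.findFrom line [')'] s none
        if q = -1 then none
        else
          loopB n line (s + 2) (parts ++ [PySem.List.slice line (some (s+1)) (some q)])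

def extract_speciesAltCore (r_num reaction line : List Char) : Option (List Char) :=
  let n := PySem.Chars.count line "C(S".toList
  let s0 := PySem.Chars.find line ['S']
  if s0 = -1 then none else          -- line.index("S") raises ValueError
  let p := PySem.Chars.findFrom line [')'] s0 none
  if p = -1 then none else           -- line.index(")", s) raises ValueError
  let parts0 := [PySem.List.slice line (some (s0+1)) (some p)]
  match loopB (n - 1) line p parts0 with
  | none => none
  | some (pos, parts) =>
    let out := reaction ++ PySem.Chars.join ['+'] parts
    let out := if PySem.Chars.isIn ['M'] (PySem.List.slice line (some pos) none) then out ++ "(+M)".toList else out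
    some (if PySem.Chars.endswith r_num ['F'] then out ++ ['='] else out)

def extract_species_alt (r_num : String) (reaction : String) (line : String) : String :=
  String.ofList ((extract_speciesAltCore r_num.toList reaction.toList line.toList).getD [])

-- ===== PRECONDITION & SPEC =====
-- scanOK tag close l n checks that l contains n further well-formed species groups the
-- way the original loop consumes them: a tag marker, a closer somewhere after it,
-- resuming two characters past the marker.
def scanOK (tag close : List Char) : List Char → Nat → Bool
  | _, 0 => true
  | [], _+1 => false
  | c :: t, n+1 =>
      if [c] = tag then
        match t with
        | [] => false
        | _ :: t2 => PySem.Chars.isIn close t && scanOK tag close t2 n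
      else scanOK tag close t (n+1)

-- Pre_ excludes (a) the inputs where A raises (empty r_num, no species marker, no
-- closing bracket after the first marker, a loop iteration finding no marker), and
-- (b) the inputs where a species after the first lacks a closing bracket: there A, whose
-- find returns -1, silently truncates the fragment while B, using index, raises ValueError.
def Pre_extract_species (r_num : String) (reaction : String) (line : String) : Prop :=
  r_num ≠ "" ∧
  PySem.Chars.isIn "S".toList line.toList = true ∧
  PySem.Chars.isIn ")".toList (line.toList.drop (PySem.Chars.find line.toList "S".toList).toNat) = true ∧
  scanOK "S".toList ")".toList
    (line.toList.drop ((PySem.Chars.find line.toList "S".toList).toNat +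
      (PySem.Chars.find (line.toList.drop (PySem.Chars.find line.toList "S".toList).toNat) ")".toList).toNat))
    (PySem.Chars.count line.toList "C(S".toList - 1) = true
instance (r_num : String) (reaction : String) (line : String) : Decidable (Pre_extract_species r_num reaction line) := by unfold Pre_extract_species; infer_instance

def pvWitness_extract_species : String × String × String := ("1F", "R12: ", "C(S H2)")

def Spec_extract_species (r_num : String) (reaction : String) (line : String) (out : String) : Prop := out = extract_species_alt r_num reaction line
instance (r_num : String) (reaction : String) (line : String) (out : String) : Decidable (Spec_extract_species r_num reaction line out) := by unfold Spec_extract_species; infer_instance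

-- ===== CLAIM (what is proved, stated in full; the proofs are below) =====
def Claim_equal_extract_species : Prop := ∀ (r_num : String) (reaction : String) (line : String), Dom_extract_species r_num reaction line → Pre_extract_species r_num reaction line → Spec_extract_species r_num reaction line (extract_species r_num reaction line)

-- ===== LEMMAS AND PROOFS =====

lemma findFrom_nonneg (l sub : List Char) (k : Int) (hk : 0 ≤ k) (hs : sub ≠ []) :
    PySem.Chars.findFrom l sub k none =
      if PySem.Chars.find (l.drop k.toNat) sub = -1 then -1
      else k + PySem.Chars.find (l.drop k.toNat) sub := by
  by_cases hlen : k ≤ (l.length : Int)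
  · have h := PySem.Chars.findFrom_natCast l sub k.toNat (by omega)
    rw [show ((k.toNat : Int)) = k by omega] at h
    exact h
  · have hd : l.drop k.toNat = [] := List.drop_eq_nil_of_le (by omega)
    rw [hd]
    have hfind : PySem.Chars.find [] sub = -1 :=
      (PySem.Chars.find_eq_neg_one_iff [] sub).mpr (by simpa [List.infix_nil] using hs)
    rw [hfind]
    simp [PySem.Chars.findFrom]
    intro h1
    omega

lemma find_of_prefix (l sub : List Char) (h : sub <+: l) (hs : sub ≠ []) :
    PySem.Chars.find l sub = 0 := by
  have hnn : 0 ≤ PySem.Chars.find l sub :=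
    (PySem.Chars.find_nonneg_iff l sub).mpr h.isInfix
  have hspec := PySem.Chars.find_spec (s := l) (sub := sub) hnn
  rcases Nat.eq_zero_or_pos (PySem.Chars.find l sub).toNat with h0 | h0
  · omega
  · exact absurd (by simpa using h) (hspec.2 0 h0)

-- find l ['S'] is characterised by a prefix occurrence with nothing earlier
lemma find_eq_of (l sub : List Char) (k : Nat) (hp : sub <+: l.drop k)
    (hmin : ∀ j < k, ¬ sub <+: l.drop j) :
    PySem.Chars.find l sub = (k : Int) := by
  have hnn : 0 ≤ PySem.Chars.find l sub :=
    (PySem.Chars.find_nonneg_iff l sub).mpr (List.IsInfix.trans hp.isInfix (List.drop_suffix _ _).isInfix)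
  have hspec := PySem.Chars.find_spec (s := l) (sub := sub) hnn
  by_cases hlt : (PySem.Chars.find l sub).toNat < k
  · exact absurd hspec.1 (hmin _ hlt)
  · by_cases hgt : k < (PySem.Chars.find l sub).toNat
    · exact absurd hp (hspec.2 k hgt)
    · omega

lemma scanOK_cons_ne (c : Char) (t : List Char) (n : Nat) (hc : ¬ c = 'S') :
    scanOK ['S'] [')'] (c :: t) (n+1) = scanOK ['S'] [')'] t (n+1) := by
  rw [scanOK.eq_def]
  simp only [List.cons.injEq, hc, false_and, if_false]

-- unfolding scanOK at a successor: the first 'S' is found, a ')' follows it,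
-- and the scan continues two characters past the 'S'
lemma scanOK_succ (l : List Char) (n : Nat) (h : scanOK ['S'] [')'] l (n+1) = true) :
    0 ≤ PySem.Chars.find l ['S'] ∧
    ')' ∈ l.drop ((PySem.Chars.find l ['S']).toNat + 1) ∧
    scanOK ['S'] [')'] (l.drop ((PySem.Chars.find l ['S']).toNat + 2)) n = true := by
  induction l with
  | nil => simp [scanOK] at h
  | cons c t ih =>
    by_cases hc : c = 'S'
    · subst hc
      have hf : PySem.Chars.find ('S' :: t) ['S'] = (0 : Int) :=
        find_of_prefix _ _ (by simp) (by simp)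
      cases t with
      | nil => simp [scanOK] at h
      | cons c2 t2 =>
        replace h : (PySem.Chars.isIn [')'] (c2 :: t2) && scanOK ['S'] [')'] t2 n) = true := h
        rw [Bool.and_eq_true] at h
        have hm : ')' ∈ c2 :: t2 :=
          (List.singleton_infix_iff _ _).mp ((PySem.Chars.isIn_iff_infix _ _).mp h.1)
        refine ⟨by omega, ?_, ?_⟩
        · rw [hf]; simpa using hm
        · rw [hf]; simpa using h.2
    · rw [scanOK_cons_ne c t n hc] at h
      obtain ⟨ih1, ih2, ih3⟩ := ih h
      have hf : PySem.Chars.find (c :: t) ['S'] = (((PySem.Chars.find t ['S']).toNat + 1 : Nat) : Int) := by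
        apply find_eq_of
        · have := (PySem.Chars.find_spec (s := t) (sub := ['S']) ih1).1
          simpa using this
        · intro j hj
          match j, hj with
          | 0, _ =>
            intro hpre
            obtain ⟨u, hu⟩ := hpre
            simp at hu
            exact hc hu.1.symm
          | j+1, hj =>
            have := (PySem.Chars.find_spec (s := t) (sub := ['S']) ih1).2 j (by omega)
            simpa using this
      rw [hf]
      have htn : ((((PySem.Chars.find t ['S']).toNat + 1 : Nat) : Int)).toNat
          = (PySem.Chars.find t ['S']).toNat + 1 := Int.toNat_natCast _
      refine ⟨Int.natCast_nonneg _, ?_, ?_⟩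
      · rw [htn, List.drop_succ_cons]
        exact ih2
      · rw [htn, show (PySem.Chars.find t ['S']).toNat + 1 + 2
            = ((PySem.Chars.find t ['S']).toNat + 2) + 1 by omega, List.drop_succ_cons]
        exact ih3

lemma join_append_singleton (parts : List (List Char)) (p : List Char) (h : parts ≠ []) :
    PySem.Chars.join ['+'] (parts ++ [p]) = PySem.Chars.join ['+'] parts ++ ['+'] ++ p := by
  induction parts with
  | nil => simp at h
  | cons a t ih =>
    cases t with
    | nil => simp [PySem.Chars.join_cons_cons, PySem.Chars.join_singleton]
    | cons b t2 =>
      have ih' := ih (by simp)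
      simp only [List.cons_append] at ih' ⊢
      rw [PySem.Chars.join_cons_cons ['+'] a b (t2 ++ [p]), ih', PySem.Chars.join_cons_cons]
      simp

lemma loop_eq (L : List Char) : ∀ (fuel : Nat) (pos : Int), 0 ≤ pos →
    scanOK ['S'] [')'] (L.drop pos.toNat) fuel = true →
    ∀ (R : List Char) (parts : List (List Char)), parts ≠ [] →
    loopA fuel (L.drop pos.toNat) (R ++ PySem.Chars.join ['+'] parts) =
      (loopB fuel L pos parts).map (fun r => (L.drop r.1.toNat, R ++ PySem.Chars.join ['+'] r.2)) ∧
    (∀ r, loopB fuel L pos parts = some r → 0 ≤ r.1 ∧ r.2 ≠ []) := by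
  intro fuel
  induction fuel with
  | zero =>
    intro pos h0 _ R parts hp
    refine ⟨by simp [loopA, loopB], ?_⟩
    intro r hr
    simp [loopB] at hr
    subst hr
    exact ⟨h0, hp⟩
  | succ n ih =>
    intro pos h0 hscan R parts hp
    obtain ⟨hsA0, hclose, hnext⟩ := scanOK_succ _ _ hscan
    have hFF := findFrom_nonneg L ['S'] pos h0 (by simp)
    obtain ⟨sA, hsAv⟩ : ∃ v, PySem.Chars.find (L.drop pos.toNat) ['S'] = v := ⟨_, rfl⟩
    rw [hsAv] at hFF hsA0 hclose hnext
    have hsA : ¬ sA = -1 := by omega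
    rw [if_neg hsA] at hFF
    have hpref : ['S'] <+: (L.drop pos.toNat).drop sA.toNat := by
      have h := (PySem.Chars.find_spec (s := L.drop pos.toNat) (sub := ['S']) (by omega)).1
      rwa [hsAv] at h
    have hdd : (L.drop pos.toNat).drop sA.toNat = L.drop (pos + sA).toNat := by
      rw [List.drop_drop]
      congr 1
      omega
    have hult : (pos + sA).toNat < L.length := by
      by_contra hge
      rw [hdd, List.drop_eq_nil_of_le (by omega)] at hpref
      simp [List.prefix_nil] at hpref
    have hFF2 := findFrom_nonneg L [')'] (pos + sA) (by omega) (by simp)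
    have hline' : PySem.List.slice (L.drop pos.toNat) (some sA) none = L.drop (pos + sA).toNat := by
      rw [PySem.List.slice_from _ hsA0, hdd]
    have hfindS0 : PySem.Chars.find (L.drop (pos + sA).toNat) ['S'] = 0 :=
      find_of_prefix _ _ (hdd ▸ hpref) (by simp)
    -- the ')' required by scanOK makes the loop-body find succeed in both ports
    have hmem : ')' ∈ L.drop ((pos + sA).toNat + 1) := by
      have : (L.drop pos.toNat).drop (sA.toNat + 1) = L.drop ((pos + sA).toNat + 1) := by
        rw [List.drop_drop]; congr 1; omega
      rw [← this]
      exact hclose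
    have hinf : [')'] <:+: L.drop (pos + sA).toNat := by
      have h1 : [')'] <:+: L.drop ((pos + sA).toNat + 1) :=
        (List.singleton_infix_iff _ _).mpr hmem
      have h2 : L.drop ((pos + sA).toNat + 1) <:+: L.drop (pos + sA).toNat := by
        have hdx := List.drop_suffix 1 (L.drop (pos + sA).toNat)
        rw [List.drop_drop] at hdx
        exact hdx.isInfix
      exact h1.trans h2
    obtain ⟨jA, hjAv⟩ : ∃ v, PySem.Chars.find (L.drop (pos + sA).toNat) [')'] = v := ⟨_, rfl⟩
    have hjA : ¬ jA = -1 := by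
      have := (PySem.Chars.find_ne_neg_one_iff (L.drop (pos + sA).toNat) [')']).mpr hinf
      omega
    have hjA0 : 0 ≤ jA := by
      have := hjAv ▸ PySem.Chars.neg_one_le_find (L.drop (pos + sA).toNat) [')']
      omega
    rw [hjAv] at hFF2
    have hq : PySem.Chars.findFrom L [')'] (pos + sA) none = pos + sA + jA := by
      rw [hFF2]; exact if_neg hjA
    -- step equation for loop A
    have hstepA : loopA (n+1) (L.drop pos.toNat) (R ++ PySem.Chars.join ['+'] parts) =
        loopA n (L.drop (pos + sA + 2).toNat)
          ((R ++ PySem.Chars.join ['+'] parts) ++ ['+'] ++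
            PySem.List.slice (L.drop (pos + sA).toNat) (some 1) (some jA)) := by
      simp only [loopA, hsAv, if_neg hsA, hline', find_speciesA, hfindS0, hjAv, zero_add]
      rw [PySem.List.slice_from _ (by omega : (0:Int) ≤ 2), List.drop_drop,
        show (pos + sA).toNat + Int.toNat 2 = (pos + sA + 2).toNat from by omega]
    -- step equation for loop B
    have hstepB : loopB (n+1) L pos parts = loopB n L (pos + sA + 2)
        (parts ++ [PySem.List.slice L (some (pos + sA + 1)) (some (pos + sA + jA))]) := by
      simp only [loopB, hFF, if_neg (show ¬ pos + sA = -1 by omega), hq,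
        if_neg (show ¬ pos + sA + jA = -1 by omega)]
    -- the two fragments agree
    have hfrag2 : PySem.List.slice (L.drop (pos + sA).toNat) (some 1) (some jA) =
        PySem.List.slice L (some (pos + sA + 1)) (some (pos + sA + jA)) := by
      rw [PySem.List.slice_toNat _ (by omega : (0:Int) ≤ 1) (by omega),
        PySem.List.slice_toNat _ (by omega) (by omega), List.drop_drop]
      congr 1
      · omega
      · congr 1
        omega
    have hscan' : scanOK ['S'] [')'] (L.drop (pos + sA + 2).toNat) n = true := by
      have : (L.drop pos.toNat).drop (sA.toNat + 2) = L.drop (pos + sA + 2).toNat := by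
        rw [List.drop_drop]; congr 1; omega
      rwa [this] at hnext
    obtain ⟨ihEq, ihInv⟩ := ih (pos + sA + 2) (by omega) hscan' R
      (parts ++ [PySem.List.slice L (some (pos + sA + 1)) (some (pos + sA + jA))]) (by simp)
    constructor
    · rw [hstepA, hstepB, hfrag2]
      rw [show (R ++ PySem.Chars.join ['+'] parts) ++ ['+'] ++
          PySem.List.slice L (some (pos + sA + 1)) (some (pos + sA + jA)) =
          R ++ PySem.Chars.join ['+'] (parts ++ [PySem.List.slice L (some (pos + sA + 1)) (some (pos + sA + jA))]) by
        rw [join_append_singleton parts _ hp]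
        simp [List.append_assoc]]
      exact ihEq
    · intro r hr
      rw [hstepB] at hr
      exact ihInv r hr

lemma pyGet_neg_one_getLast (l : List Char) (h : l ≠ []) :
    PySem.List.pyGet? l (-1) = some (l.getLast h) := by
  simp [PySem.List.pyGet?, PySem.List.pyIdx?]
  have hl : 1 ≤ l.length := List.length_pos_iff.mpr h
  rw [if_pos hl]
  simp [List.getElem?_eq_getElem (show l.length - 1 < l.length by omega), List.getLast_eq_getElem]

lemma endswith_F_iff (l : List Char) (h : l ≠ []) :
    PySem.Chars.endswith l ['F'] = true ↔ l.getLast h = 'F' := by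
  rw [PySem.Chars.endswith_iff]
  constructor
  · rintro ⟨t, rfl⟩
    simp
  · intro hF
    refine ⟨l.dropLast, ?_⟩
    rw [← hF]
    exact List.dropLast_append_getLast h

lemma core_eq (r_num reaction line : List Char) (h : r_num ≠ [])
    (hS : PySem.Chars.isIn ['S'] line = true)
    (hP : PySem.Chars.isIn [')'] (line.drop (PySem.Chars.find line ['S']).toNat) = true)
    (hscan : scanOK ['S'] [')'] (line.drop ((PySem.Chars.find line ['S']).toNat +
        (PySem.Chars.find (line.drop (PySem.Chars.find line ['S']).toNat) [')']).toNat))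
      (PySem.Chars.count line "C(S".toList - 1) = true) :
    extract_speciesCore r_num reaction line = extract_speciesAltCore r_num reaction line := by
  have hs00 : 0 ≤ PySem.Chars.find line ['S'] :=
    (PySem.Chars.find_nonneg_iff line ['S']).mpr ((PySem.Chars.isIn_iff_infix _ _).mp hS)
  obtain ⟨s0, hs0v⟩ : ∃ v, PySem.Chars.find line ['S'] = v := ⟨_, rfl⟩
  rw [hs0v] at hs00 hP hscan
  have hs0 : ¬ s0 = -1 := by omega
  have hpref : ['S'] <+: line.drop s0.toNat := by
    have hh := (PySem.Chars.find_spec (s := line) (sub := ['S']) (by omega)).1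
    rwa [hs0v] at hh
  have hslt : s0.toNat < line.length := by
    by_contra hge
    rw [List.drop_eq_nil_of_le (by omega)] at hpref
    simp [List.prefix_nil] at hpref
  have hline1 : PySem.List.slice line (some s0) none = line.drop s0.toNat :=
    PySem.List.slice_from _ hs00
  have hfindS0 : PySem.Chars.find (line.drop s0.toNat) ['S'] = 0 :=
    find_of_prefix _ _ hpref (by simp)
  have hFF := findFrom_nonneg line [')'] s0 hs00 (by simp)
  obtain ⟨j, hjv⟩ : ∃ v, PySem.Chars.find (line.drop s0.toNat) [')'] = v := ⟨_, rfl⟩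
  rw [hjv] at hFF hscan
  have hj : ¬ j = -1 := by
    have := (PySem.Chars.find_ne_neg_one_iff (line.drop s0.toNat) [')']).mpr
      ((PySem.Chars.isIn_iff_infix _ _).mp hP)
    omega
  have hj0 : 0 ≤ j := by
    have := hjv ▸ PySem.Chars.neg_one_le_find (line.drop s0.toNat) [')']
    omega
  have hq : PySem.Chars.findFrom line [')'] s0 none = s0 + j := by
    rw [hFF]; exact if_neg hj
  have hspec : PySem.List.slice (line.drop s0.toNat) (some (0+1)) (some j) =
      PySem.List.slice line (some (s0+1)) (some (s0+j)) := by
    rw [PySem.List.slice_toNat _ (by omega) (by omega),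
      PySem.List.slice_toNat _ (by omega) (by omega), List.drop_drop]
    congr 1
    · omega
    · congr 1
      omega
  have hline2 : PySem.List.slice (line.drop s0.toNat) (some j) none = line.drop (s0+j).toNat := by
    rw [PySem.List.slice_from _ (by omega), List.drop_drop]
    congr 1
    omega
  have hscan2 : scanOK ['S'] [')'] (line.drop (s0 + j).toNat) (PySem.Chars.count line "C(S".toList - 1) = true := by
    rwa [show (s0 + j).toNat = s0.toNat + j.toNat by omega]
  obtain ⟨hEq, hInv⟩ := loop_eq line (PySem.Chars.count line "C(S".toList - 1) (s0 + j)
    (by omega) hscan2 reaction [PySem.List.slice line (some (s0+1)) (some (s0+j))] (by simp)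
  simp only [extract_speciesCore, extract_speciesAltCore, hs0v, if_neg hs0, if_neg hj,
    hline1, hjv, hq, if_neg (show ¬ s0 + j = -1 by omega), find_speciesA, hfindS0,
    hspec, hline2]
  rw [show reaction ++ PySem.List.slice line (some (s0+1)) (some (s0+j)) =
      reaction ++ PySem.Chars.join ['+'] [PySem.List.slice line (some (s0+1)) (some (s0+j))] by
    rw [PySem.Chars.join_singleton]]
  rw [hEq]
  cases hB : loopB (PySem.Chars.count line "C(S".toList - 1) line (s0 + j)
      [PySem.List.slice line (some (s0+1)) (some (s0+j))] with
  | none => simp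
  | some r =>
    obtain ⟨hr0, hrp⟩ := hInv r hB
    simp only [Option.map_some]
    rw [PySem.List.slice_from _ hr0]
    have hget := pyGet_neg_one_getLast r_num h
    by_cases hF : r_num.getLast h = 'F'
    · simp only [hget, hF, if_pos ((endswith_F_iff r_num h).mpr hF)]
      simp
    · have hE : PySem.Chars.endswith r_num ['F'] = false :=
        Bool.eq_false_iff.mpr (fun hc => hF ((endswith_F_iff r_num h).mp hc))
      simp only [hget, hE]
      simp [hF]

-- ===== VERDICT (by name: the statement is the Claim_ definition above) =====
theorem extract_species_spec : Claim_equal_extract_species := by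
  intro r_num reaction line _ hpre
  unfold Spec_extract_species extract_species extract_species_alt
  have hS : PySem.Chars.isIn ['S'] line.toList = true := hpre.2.1
  have hP : PySem.Chars.isIn [')'] (line.toList.drop (PySem.Chars.find line.toList ['S']).toNat) = true := hpre.2.2.1
  have hscan : scanOK ['S'] [')'] (line.toList.drop ((PySem.Chars.find line.toList ['S']).toNat +
      (PySem.Chars.find (line.toList.drop (PySem.Chars.find line.toList ['S']).toNat) [')']).toNat))
      (PySem.Chars.count line.toList "C(S".toList - 1) = true := hpre.2.2.2
  rw [core_eq _ _ _ (fun hnil => hpre.1 (String.toList_eq_nil_iff.mp hnil)) hS hP hscan]
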